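-- pv_equiv track=rewrite | github.com/yohanse/A2SV | B_Roof_Construction.py | smallest_cost
-- ===== SOURCE A (Python) =====
-- def smallest_cost(n):
--     # Calculate the highest power of 2 less than n
--     k = 1
--     while (1 << k) <= n:
--         k += 1
--     k -= 1
--
--     # Generate a Gray code sequence of length k
--     gray_code = [0]
--     for i in range(k):
--         gray_code += [x + (1 << i) for x in reversed(gray_code)]
--
--     # Construct the sequence of heights using the Gray code sequence
--     heights = [gray_code[i] for i in range(k + 1)]
--     for i in range(k + 1, n):
--         heights.append(heights[-1] ^ (heights[-1] & -heights[-1]) << 1)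
--
--     return heights
-- ===== SOURCE B (Python) =====
-- def smallest_cost(n):
--     # Find k with 2^k <= n < 2^(k+1) (k = 0 when n < 2), exactly as in A
--     k = 1
--     while (1 << k) <= n:
--         k += 1
--     k -= 1
--     # Closed-form reflected Gray code: entry i is i ^ (i >> 1); no 2^k-sized table
--     heights = [i ^ (i >> 1) for i in range(k + 1)]
--     h = heights[-1]
--     for _ in range(k + 1, n):
--         h ^= (h & -h) << 1
--         heights.append(h)
--     return heights
-- ===== Notes on version B (the rewrite author's own statement) =====
-- stated objective: faster
-- what changed: Replaces the reflect-and-prefix construction of a 2^k-entry Gray-code table (of which only the first k+1 entries are used) with the closed-form formula i ^ (i >> 1) computed directly for i = 0..k, and carries the running last height in a variable instead of re-indexing heights[-1].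
import Mathlib
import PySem

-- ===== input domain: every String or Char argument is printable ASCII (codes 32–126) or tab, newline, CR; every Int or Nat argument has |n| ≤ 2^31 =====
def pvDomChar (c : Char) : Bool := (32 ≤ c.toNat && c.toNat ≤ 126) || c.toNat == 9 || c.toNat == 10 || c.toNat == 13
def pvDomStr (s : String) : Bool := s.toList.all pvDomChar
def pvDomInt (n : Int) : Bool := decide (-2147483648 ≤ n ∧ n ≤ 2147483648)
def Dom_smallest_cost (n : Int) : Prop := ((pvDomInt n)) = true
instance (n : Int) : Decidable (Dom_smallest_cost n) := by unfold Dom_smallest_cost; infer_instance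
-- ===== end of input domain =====

-- B replaces A's 2^k-entry reflected Gray-code table by the closed form i ^ (i >> 1)
-- for the first k+1 heights and carries the last height in a variable (objective: faster).

-- ===== PORT A =====
-- while (1 << k) <= n: k += 1   (shared verbatim by both Python versions)
def pvKLoop (n : Int) (k : Nat) : Nat :=
  if ((1 : Int) <<< k) ≤ n then pvKLoop n (k + 1) else k
termination_by (n.toNat + 1) - 2 ^ k
decreasing_by
  rename_i h
  have h2 : (2 : Int) ^ k ≤ n := by simpa [Int.shiftLeft_eq] using h
  have h2' : ((2 ^ k : Nat) : Int) ≤ n := by exact_mod_cast h2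
  have h3 : 2 ^ k ≤ n.toNat := by omega
  have h4 : 2 ^ k < 2 ^ (k + 1) := by
    exact Nat.pow_lt_pow_right (by norm_num) (Nat.lt_succ_self k)
  omega

-- gray_code = [0]; for i in range(k): gray_code += [x + (1 << i) for x in reversed(gray_code)]
def pvGrayBuild : Nat → List Int
  | 0 => [0]
  | k + 1 => pvGrayBuild k ++ (pvGrayBuild k).reverse.map (fun x => x + ((1 : Int) <<< k))

def smallest_cost (n : Int) : List Int :=
  let k : Nat := pvKLoop n 1 - 1
  let gray : List Int := pvGrayBuild k
  let heights : List Int :=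
    (PySem.List.pyRange 0 ((k : Int) + 1) 1).map (fun i => PySem.List.pyGetD gray i 0)
  (PySem.List.pyRange ((k : Int) + 1) n 1).foldl
    (fun hs _ =>
      hs ++ [PySem.Int.bxor (PySem.List.pyGetD hs (-1) 0)
        ((PySem.Int.band (PySem.List.pyGetD hs (-1) 0) (-(PySem.List.pyGetD hs (-1) 0))) <<< (1 : Nat))])
    heights

-- ===== PORT B =====
def smallest_cost_alt (n : Int) : List Int :=
  let k : Nat := pvKLoop n 1 - 1
  let heights : List Int :=
    (PySem.List.pyRange 0 ((k : Int) + 1) 1).map (fun i => PySem.Int.bxor i (i >>> (1 : Nat)))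
  let h : Int := PySem.List.pyGetD heights (-1) 0
  ((PySem.List.pyRange ((k : Int) + 1) n 1).foldl
    (fun (p : List Int × Int) _ =>
      let h' := PySem.Int.bxor p.2 ((PySem.Int.band p.2 (-p.2)) <<< (1 : Nat))
      (p.1 ++ [h'], h'))
    (heights, h)).1

-- ===== PRECONDITION & SPEC =====
def Spec_smallest_cost (n : Int) (out : List Int) : Prop := out = smallest_cost_alt n
instance (n : Int) (out : List Int) : Decidable (Spec_smallest_cost n out) := by unfold Spec_smallest_cost; infer_instance

-- ===== CLAIM (what is proved, stated in full; the proofs are below) =====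
def Claim_equal_smallest_cost : Prop := ∀ (n : Int), Dom_smallest_cost n → Spec_smallest_cost n (smallest_cost n)

-- ===== LEMMAS AND PROOFS =====

theorem pvKLoop_le (n : Int) (m : Nat) (hn : n < 2 ^ m) :
    ∀ (d k : Nat), m = k + d → pvKLoop n k ≤ m := by
  intro d
  induction d with
  | zero =>
    intro k hk
    rw [pvKLoop]
    have : ¬ ((1 : Int) <<< k ≤ n) := by
      rw [Int.shiftLeft_eq]
      subst hk; simpa using hn
    simp [this, hk]
  | succ d ih =>
    intro k hk
    rw [pvKLoop]
    split
    · exact ih (k + 1) (by omega)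
    · omega

theorem pvGrayBuild_length (k : Nat) : (pvGrayBuild k).length = 2 ^ k := by
  induction k with
  | zero => simp [pvGrayBuild]
  | succ k ih => simp [pvGrayBuild, ih]; ring

theorem pvGrayBuild_prefix {a b : Nat} (h : a ≤ b) :
    ∃ r, pvGrayBuild b = pvGrayBuild a ++ r := by
  induction b with
  | zero => exact ⟨[], by simp [Nat.le_zero.mp h]⟩
  | succ b ih =>
    rcases Nat.lt_or_ge a (b + 1) with h' | h'
    · obtain ⟨r, hr⟩ := ih (by omega)
      exact ⟨r ++ (pvGrayBuild b).reverse.map (fun x => x + ((1 : Int) <<< b)),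
        by simp [pvGrayBuild, hr]⟩
    · have : a = b + 1 := by omega
      exact ⟨[], by simp [this]⟩

theorem pvGrayBuild_get (k i : Nat) (h1 : i < 2 ^ k) (h2 : i < 32) :
    (pvGrayBuild k)[i]? = (pvGrayBuild 5)[i]? := by
  rcases Nat.le_total k 5 with h | h
  · obtain ⟨r, hr⟩ := pvGrayBuild_prefix h
    rw [hr, List.getElem?_append_left (by rw [pvGrayBuild_length]; exact h1)]
  · obtain ⟨r, hr⟩ := pvGrayBuild_prefix h
    rw [hr, List.getElem?_append_left (by rw [pvGrayBuild_length]; exact h2)]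

theorem pvGray5_closed : ∀ i : Nat, i < 32 →
    (pvGrayBuild 5)[i]? = some (PySem.Int.bxor (i : Int) ((i : Int) >>> (1 : Nat))) := by
  decide

theorem pv_prefix_eq (k : Nat) (hk : k ≤ 31) :
    (PySem.List.pyRange 0 ((k : Int) + 1) 1).map (fun i => PySem.List.pyGetD (pvGrayBuild k) i 0)
      = (PySem.List.pyRange 0 ((k : Int) + 1) 1).map (fun i => PySem.Int.bxor i (i >>> (1 : Nat))) := by
  have hcast : ((k : Int) + 1) = ((k + 1 : Nat) : Int) := by push_cast; ring
  rw [hcast, PySem.List.pyRange_zero_nat, List.map_map, List.map_map]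
  apply List.map_congr_left
  intro j hj
  have hj' : j < k + 1 := List.mem_range.mp hj
  have hjk : j < 2 ^ k := lt_of_lt_of_le hj' (Nat.succ_le_of_lt (Nat.lt_two_pow_self))
  have h32 : j < 32 := by omega
  simp only [Function.comp]
  rw [PySem.List.pyGetD_natCast, List.getD_eq_getElem?_getD, pvGrayBuild_get k j hjk h32,
    pvGray5_closed j h32]
  rfl

theorem pv_cont_fold :
    ∀ (L : List Int) (hs : List Int) (h : Int),
      PySem.List.pyGetD hs (-1) 0 = h →
      L.foldl (fun hs _ =>
          hs ++ [PySem.Int.bxor (PySem.List.pyGetD hs (-1) 0)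
            ((PySem.Int.band (PySem.List.pyGetD hs (-1) 0) (-(PySem.List.pyGetD hs (-1) 0))) <<< (1 : Nat))]) hs
        = (L.foldl (fun (p : List Int × Int) _ =>
            (p.1 ++ [PySem.Int.bxor p.2 ((PySem.Int.band p.2 (-p.2)) <<< (1 : Nat))],
             PySem.Int.bxor p.2 ((PySem.Int.band p.2 (-p.2)) <<< (1 : Nat)))) (hs, h)).1 := by
  intro L
  induction L with
  | nil => intro hs h _; rfl
  | cons x L ih =>
    intro hs h hh
    simp only [List.foldl_cons, hh]
    exact ih _ _ (PySem.List.pyGetD_neg_one_append_singleton hs _ 0)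

-- ===== VERDICT (by name: the statement is the Claim_ definition above) =====
theorem smallest_cost_spec : Claim_equal_smallest_cost := by
  intro n hdom
  have hn : n ≤ 2147483648 := by
    simp only [Dom_smallest_cost, pvDomInt, decide_eq_true_eq] at hdom
    exact hdom.2
  have hk31 : pvKLoop n 1 - 1 ≤ 31 := by
    have h32 : pvKLoop n 1 ≤ 32 := pvKLoop_le n 32 (by norm_num; omega) 31 1 rfl
    omega
  simp only [Spec_smallest_cost, smallest_cost, smallest_cost_alt]
  rw [pv_prefix_eq _ hk31]
  exact pv_cont_fold _ _ _ rfl
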